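-- pv_equiv track=rewrite | github.com/Carlos-Menino/Minimal_Congestion_Spanning_Tree | spanning_trees.py | hypercube_spanning_tree
-- ===== SOURCE A (Python) =====
-- def hypercube_spanning_tree(n):
--     T = [[0,1,1]]
--     for i in range(1,n):
--         T_copy = T.copy()
--         for e in T_copy:
--             T.append([e[0]+2**i,e[1]+2**i,1])
--         T.append([0,2**i,1])
--     return T
-- ===== SOURCE B (Python) =====
-- def hypercube_spanning_tree(n):
--     def build(k):
--         if k <= 0:
--             return [[0, 1, 1]]
--         prev = build(k - 1)
--         s = 2 ** k
--         return prev + [[e[0] + s, e[1] + s, 1] for e in prev] + [[0, s, 1]]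
--     return build(n - 1)
-- ===== Notes on version B (the rewrite author's own statement) =====
-- stated objective: alternative
-- what changed: Replaces the imperative loop that mutates and scans a copy of T with a recursive helper build(k) that constructs the level-k edge list from build(k-1) by pure concatenation of the shifted copy.
import Mathlib
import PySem

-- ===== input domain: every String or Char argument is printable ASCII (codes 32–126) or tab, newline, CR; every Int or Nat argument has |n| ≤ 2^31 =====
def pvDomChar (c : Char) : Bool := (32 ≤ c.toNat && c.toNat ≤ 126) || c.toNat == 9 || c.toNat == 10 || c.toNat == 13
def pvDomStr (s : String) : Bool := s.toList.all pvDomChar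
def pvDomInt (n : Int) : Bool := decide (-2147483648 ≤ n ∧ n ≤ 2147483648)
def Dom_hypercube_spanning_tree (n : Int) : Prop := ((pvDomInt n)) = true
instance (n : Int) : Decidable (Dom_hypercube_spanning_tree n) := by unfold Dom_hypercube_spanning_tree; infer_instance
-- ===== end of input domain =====

-- B replaces A's mutate-a-copy loop by a recursive helper over the dimension; same values, same cost.
-- ===== PORT A =====
-- e[0]/e[1]: every edge built by the algorithm is a 3-element list, so Python never raises;
-- ported as pyGetD with default 0 (exact here). 2**i with i ≥ 0 from range(1,n) is 2^(i.toNat).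
def hypercube_spanning_tree (n : Int) : List (List Int) :=
  (PySem.List.pyRange 1 n 1).foldl
    (fun T i =>
      let Tcopy := T
      let T := Tcopy.foldl
        (fun acc e =>
          acc ++ [[PySem.List.pyGetD e 0 0 + 2 ^ i.toNat,
                   PySem.List.pyGetD e 1 0 + 2 ^ i.toNat, 1]]) T
      T ++ [[0, 2 ^ i.toNat, 1]])
    [[0, 1, 1]]

-- ===== PORT B =====
def hstBuild (k : Int) : List (List Int) :=
  if _h : k ≤ 0 then [[0, 1, 1]]
  else
    let prev := hstBuild (k - 1)
    let s : Int := 2 ^ k.toNat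
    prev ++ prev.map (fun e => [PySem.List.pyGetD e 0 0 + s, PySem.List.pyGetD e 1 0 + s, 1])
      ++ [[0, s, 1]]
termination_by k.toNat
decreasing_by omega

def hypercube_spanning_tree_alt (n : Int) : List (List Int) := hstBuild (n - 1)

-- ===== PRECONDITION & SPEC =====
def Spec_hypercube_spanning_tree (n : Int) (out : List (List Int)) : Prop := out = hypercube_spanning_tree_alt n
instance (n : Int) (out : List (List Int)) : Decidable (Spec_hypercube_spanning_tree n out) := by unfold Spec_hypercube_spanning_tree; infer_instance

-- ===== CLAIM (what is proved, stated in full; the proofs are below) =====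
def Claim_equal_hypercube_spanning_tree : Prop := ∀ (n : Int), Dom_hypercube_spanning_tree n → Spec_hypercube_spanning_tree n (hypercube_spanning_tree n)

-- ===== LEMMAS AND PROOFS =====

theorem hstBuild_succ (m : Nat) :
    hstBuild ((m : Int) + 1) =
      hstBuild (m : Int)
        ++ (hstBuild (m : Int)).map
            (fun e => [PySem.List.pyGetD e 0 0 + 2 ^ (m + 1),
                       PySem.List.pyGetD e 1 0 + 2 ^ (m + 1), 1])
        ++ [[0, 2 ^ (m + 1), 1]] := by
  rw [hstBuild]
  have h1 : ¬ ((m : Int) + 1 ≤ 0) := by omega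
  have h2 : ((m : Int) + 1).toNat = m + 1 := by omega
  simp [h1, h2]

theorem hstBuild_base : hstBuild 0 = [[0, 1, 1]] := by rw [hstBuild]; simp

-- A's inner loop over the copy is a pure append of the shifted map.
theorem foldl_A (l init : List (List Int)) (s : Int) :
    l.foldl (fun acc e =>
        acc ++ [[PySem.List.pyGetD e 0 0 + s, PySem.List.pyGetD e 1 0 + s, 1]]) init
      = init ++ l.map (fun e => [PySem.List.pyGetD e 0 0 + s, PySem.List.pyGetD e 1 0 + s, 1]) := by
  exact PySem.List.foldl_append_singleton_eq_map
    (f := fun e => [PySem.List.pyGetD e 0 0 + s, PySem.List.pyGetD e 1 0 + s, 1]) l init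

theorem A_loop (m : Nat) :
    (PySem.List.pyRange 1 ((m : Int) + 1) 1).foldl
      (fun T i =>
        let Tcopy := T
        let T := Tcopy.foldl
          (fun acc e =>
            acc ++ [[PySem.List.pyGetD e 0 0 + 2 ^ i.toNat,
                     PySem.List.pyGetD e 1 0 + 2 ^ i.toNat, 1]]) T
        T ++ [[0, 2 ^ i.toNat, 1]])
      [[0, 1, 1]] = hstBuild (m : Int) := by
  induction m with
  | zero =>
    have h0 : PySem.List.pyRange 1 ((0 : Nat) + 1 : Int) 1 = [] := by decide
    rw [show ((0 : Nat) : Int) = (0 : Int) from rfl] at *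
    rw [h0, hstBuild_base]
    rfl
  | succ m ih =>
    have hc : (((m + 1 : Nat)) : Int) = (m : Int) + 1 := by push_cast; ring
    rw [hc]
    have hr : PySem.List.pyRange 1 ((m : Int) + 1 + 1) 1
        = PySem.List.pyRange 1 ((m : Int) + 1) 1 ++ [(m : Int) + 1] :=
      PySem.List.pyRange_one_succ_right (by omega)
    rw [hr, List.foldl_append, ih]
    show (hstBuild (m : Int)).foldl _ (hstBuild (m : Int)) ++ _ = _
    have ht : ((m : Int) + 1).toNat = m + 1 := by omega
    rw [foldl_A, ht, hstBuild_succ]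

-- ===== VERDICT (by name: the statement is the Claim_ definition above) =====
theorem hypercube_spanning_tree_spec : Claim_equal_hypercube_spanning_tree := by
  intro n _
  unfold Spec_hypercube_spanning_tree hypercube_spanning_tree hypercube_spanning_tree_alt
  by_cases h : n ≤ 1
  · have h0 : PySem.List.pyRange 1 n 1 = [] := by
      simp [PySem.List.pyRange]; omega
    rw [h0, hstBuild]
    simp [show n - 1 ≤ 0 by omega]
  · have hm : n = ((n - 1).toNat : Int) + 1 := by omega
    rw [hm]
    have := A_loop (n - 1).toNat
    rw [this]
    congr 1
    omega
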